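-- pv_equiv track=rewrite | github.com/Ahmed712441/Verilog-Linter | linter/FSM.py | getNewVal
-- ===== SOURCE A (Python) =====
-- def getNewVal(statements,varName,start_line,end_line):
--
--     val = None
--     for statement , line in statements:
--         if line >= start_line and line <= end_line:
--             if len(statement) == 3 and statement[0] == varName:
--                 val = statement[2]
--         elif line > end_line:
--             break
--
--     return val
-- ===== SOURCE B (Python) =====
-- def getNewVal(statements, varName, start_line, end_line):
--     # Truncate at the first statement past end_line, then search backwards
--     # for the last matching assignment.
--     prefix = []
--     for statement, line in statements:
--         if line > end_line:
--             break
--         prefix.append((statement, line))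
--     for statement, line in reversed(prefix):
--         if line >= start_line and len(statement) == 3 and statement[0] == varName:
--             return statement[2]
--     return None
-- ===== Notes on version B (the rewrite author's own statement) =====
-- stated objective: alternative
-- what changed: Replaces the forward overwrite-accumulator sweep with truncation of the list at the first line past end_line followed by a backward search that returns at the first (i.e. last) matching assignment.
import Mathlib
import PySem

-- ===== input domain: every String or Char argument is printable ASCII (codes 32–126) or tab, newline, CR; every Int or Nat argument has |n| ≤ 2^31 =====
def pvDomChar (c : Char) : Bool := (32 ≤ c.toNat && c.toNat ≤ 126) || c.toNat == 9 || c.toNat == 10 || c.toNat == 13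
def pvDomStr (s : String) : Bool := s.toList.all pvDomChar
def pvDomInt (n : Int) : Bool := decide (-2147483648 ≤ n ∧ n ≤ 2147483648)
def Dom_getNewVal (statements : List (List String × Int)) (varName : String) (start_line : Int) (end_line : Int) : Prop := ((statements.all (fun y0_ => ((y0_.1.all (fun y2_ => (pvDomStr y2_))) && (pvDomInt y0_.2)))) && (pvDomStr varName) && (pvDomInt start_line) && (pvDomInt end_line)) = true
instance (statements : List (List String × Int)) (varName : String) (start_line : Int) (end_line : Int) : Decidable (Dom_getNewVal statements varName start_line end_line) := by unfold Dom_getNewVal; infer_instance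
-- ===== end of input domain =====

-- B replaces A's forward overwrite-accumulator sweep by truncating the list at the
-- first line past end_line and searching the prefix backwards for the last match.
-- ===== PORT A =====
-- the loop of A: `val` accumulator, in-range overwrite, break on line > end_line
def getNewValLoopA (varName : String) (start_line : Int) (end_line : Int) :
    List (List String × Int) → Option String → Option String
  | [], val => val
  | (statement, line) :: rest, val =>
    if start_line ≤ line ∧ line ≤ end_line then
      -- statement[2] is in range because the guard requires len(statement) == 3
      getNewValLoopA varName start_line end_line rest
        (if statement.length = 3 ∧ PySem.List.pyGet? statement 0 = some varName then
           PySem.List.pyGet? statement 2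
         else val)
    else if end_line < line then val
    else getNewValLoopA varName start_line end_line rest val

def getNewVal (statements : List (List String × Int)) (varName : String) (start_line : Int) (end_line : Int) : Option String :=
  getNewValLoopA varName start_line end_line statements none

-- ===== PORT B =====
-- first loop of B: materialize the prefix with line ≤ end_line
def getNewValPrefix (end_line : Int) : List (List String × Int) → List (List String × Int)
  | [] => []
  | (statement, line) :: rest =>
    if end_line < line then []
    else (statement, line) :: getNewValPrefix end_line rest

-- second loop of B: scan (an already reversed list), return at the first match
def getNewValFind (varName : String) (start_line : Int) : List (List String × Int) → Option String
  | [] => none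
  | (statement, line) :: rest =>
    if start_line ≤ line ∧ statement.length = 3 ∧ PySem.List.pyGet? statement 0 = some varName then
      PySem.List.pyGet? statement 2
    else getNewValFind varName start_line rest

def getNewVal_alt (statements : List (List String × Int)) (varName : String) (start_line : Int) (end_line : Int) : Option String :=
  getNewValFind varName start_line (getNewValPrefix end_line statements).reverse

-- ===== PRECONDITION & SPEC =====
def Spec_getNewVal (statements : List (List String × Int)) (varName : String) (start_line : Int) (end_line : Int) (out : Option String) : Prop := out = getNewVal_alt statements varName start_line end_line
instance (statements : List (List String × Int)) (varName : String) (start_line : Int) (end_line : Int) (out : Option String) : Decidable (Spec_getNewVal statements varName start_line end_line out) := by unfold Spec_getNewVal; infer_instance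

-- ===== CLAIM (what is proved, stated in full; the proofs are below) =====
def Claim_equal_getNewVal : Prop := ∀ (statements : List (List String × Int)) (varName : String) (start_line : Int) (end_line : Int), Dom_getNewVal statements varName start_line end_line → Spec_getNewVal statements varName start_line end_line (getNewVal statements varName start_line end_line)

-- ===== LEMMAS AND PROOFS =====
-- find distributes over append: first match in the left part wins
lemma getNewValFind_append (v : String) (s : Int) (l1 l2 : List (List String × Int)) :
    getNewValFind v s (l1 ++ l2) = (getNewValFind v s l1).orElse (fun _ => getNewValFind v s l2) := by
  induction l1 with
  | nil => simp [getNewValFind, Option.orElse]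
  | cons x l1 ih =>
    obtain ⟨st, line⟩ := x
    simp only [List.cons_append, getNewValFind]
    split_ifs with h
    · rcases h with ⟨_, h3, _⟩
      match st, h3 with
      | [a, b, c], _ => simp [PySem.List.pyGet?, PySem.List.pyIdx?, Option.orElse]
    · exact ih

-- the key invariant: A's loop equals B's backward search, with `val` as fallback
lemma loopA_eq (v : String) (s e : Int) (xs : List (List String × Int)) (val : Option String) :
    getNewValLoopA v s e xs val
      = (getNewValFind v s (getNewValPrefix e xs).reverse).orElse (fun _ => val) := by
  induction xs generalizing val with
  | nil => simp [getNewValLoopA, getNewValPrefix, getNewValFind, Option.orElse]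
  | cons x rest ih =>
    obtain ⟨st, line⟩ := x
    by_cases hgt : e < line
    · have hnr : ¬ (s ≤ line ∧ line ≤ e) := by omega
      simp [getNewValLoopA, getNewValPrefix, getNewValFind, hnr, hgt, Option.orElse]
    · simp only [getNewValPrefix, if_neg hgt, List.reverse_cons, getNewValFind_append]
      by_cases hin : s ≤ line ∧ line ≤ e
      · rw [getNewValLoopA, if_pos hin]
        by_cases hm : st.length = 3 ∧ PySem.List.pyGet? st 0 = some v
        · rw [if_pos hm, ih]
          rcases hm with ⟨h3, h0⟩
          match st, h3, h0 with
          | [a, b, c], _, h0 =>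
            have hfind : getNewValFind v s [([a, b, c], line)] =
                PySem.List.pyGet? [a, b, c] 2 := by
              simp only [getNewValFind]
              rw [if_pos ⟨hin.1, rfl, h0⟩]
            rw [hfind]
            cases getNewValFind v s (getNewValPrefix e rest).reverse <;>
              simp [PySem.List.pyGet?, PySem.List.pyIdx?, Option.orElse]
        · rw [if_neg hm, ih]
          have hfind : getNewValFind v s [(st, line)] = none := by
            simp only [getNewValFind]
            rw [if_neg (by tauto)]
          rw [hfind]
          cases getNewValFind v s (getNewValPrefix e rest).reverse <;>
            simp [Option.orElse]
      · rw [getNewValLoopA, if_neg hin, if_neg hgt, ih]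
        have hfind : getNewValFind v s [(st, line)] = none := by
          have hns : ¬ s ≤ line := by omega
          simp only [getNewValFind]
          rw [if_neg (by tauto)]
        rw [hfind]
        cases getNewValFind v s (getNewValPrefix e rest).reverse <;>
          simp [Option.orElse]

-- ===== VERDICT (by name: the statement is the Claim_ definition above) =====
theorem getNewVal_spec : Claim_equal_getNewVal := by
  intro statements varName start_line end_line _
  unfold Spec_getNewVal getNewVal getNewVal_alt
  rw [loopA_eq]
  cases getNewValFind varName start_line (getNewValPrefix end_line statements).reverse <;>
    simp [Option.orElse]
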